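-- pv_equiv track=rewrite | github.com/meinzeug/beagle-os | beagle-host/services/smart_scheduler.py | _normalize_green_hours
-- ===== SOURCE A (Python) =====
-- def _normalize_green_hours(green_hours: list[int] | None) -> list[int]:
--     values: list[int] = []
--     for item in list(green_hours or []):
--         try:
--             hour = int(item)
--         except (TypeError, ValueError):
--             continue
--         if 0 <= hour <= 23 and hour not in values:
--             values.append(hour)
--     return sorted(values)
-- ===== SOURCE B (Python) =====
-- def _normalize_green_hours(green_hours):
--     seen = set()
--     for item in list(green_hours or []):
--         try:
--             seen.add(int(item))
--         except (TypeError, ValueError):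
--             pass
--     return [h for h in range(24) if h in seen]
-- ===== Notes on version B (the rewrite author's own statement) =====
-- stated objective: alternative
-- what changed: Inverts the roles of input and domain: B first collects every converted value into a set with no bounds check, dedup scan or sort, then produces the result by scanning the fixed domain range(24) and keeping the hours present in the set; validation, dedup and ordering all fall out of the domain scan instead of being done per input item.
import Mathlib
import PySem

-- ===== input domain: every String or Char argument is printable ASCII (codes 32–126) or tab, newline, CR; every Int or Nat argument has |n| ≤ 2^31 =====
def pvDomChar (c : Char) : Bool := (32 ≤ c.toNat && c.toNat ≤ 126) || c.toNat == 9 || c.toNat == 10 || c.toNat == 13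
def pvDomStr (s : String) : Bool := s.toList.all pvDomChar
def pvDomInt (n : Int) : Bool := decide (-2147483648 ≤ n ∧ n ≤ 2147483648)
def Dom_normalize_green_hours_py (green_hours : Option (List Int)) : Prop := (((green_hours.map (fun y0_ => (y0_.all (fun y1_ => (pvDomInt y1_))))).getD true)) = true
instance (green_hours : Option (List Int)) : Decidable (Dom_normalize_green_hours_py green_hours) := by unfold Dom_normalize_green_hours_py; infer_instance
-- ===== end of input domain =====

-- B inverts input and domain: it first collects all converted values into a set
-- (no bounds check, dedup scan or sort), then scans the fixed domain range(24)
-- keeping the hours present in the set.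

-- ===== PORT A =====
-- the for-loop: int(item) is the identity on int items (never raises here)
def pvALoop (values : List Int) (l : List Int) : List Int :=
  match l with
  | [] => values
  | item :: rest =>
    let hour : Int := item
    if 0 ≤ hour ∧ hour ≤ 23 ∧ hour ∉ values then pvALoop (values ++ [hour]) rest
    else pvALoop values rest

def normalize_green_hours_py (green_hours : Option (List Int)) : List Int :=
  PySem.List.sorted (pvALoop [] (green_hours.getD [])) (fun x => x) false

-- ===== PORT B =====
def normalize_green_hours_py_alt (green_hours : Option (List Int)) : List Int :=
  -- seen.add(int(item)) over the loop: int(item) is the identity on int items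
  let seen : PySem.Set Int := (green_hours.getD []).foldl PySem.Set.add PySem.Set.empty
  (PySem.List.pyRange 0 24 1).filter (fun h => PySem.Set.contains seen h)

-- ===== PRECONDITION & SPEC =====
def Spec_normalize_green_hours_py (green_hours : Option (List Int)) (out : List Int) : Prop := out = normalize_green_hours_py_alt green_hours
instance (green_hours : Option (List Int)) (out : List Int) : Decidable (Spec_normalize_green_hours_py green_hours out) := by unfold Spec_normalize_green_hours_py; infer_instance

-- ===== CLAIM (what is proved, stated in full; the proofs are below) =====
def Claim_equal_normalize_green_hours_py : Prop := ∀ (green_hours : Option (List Int)), Dom_normalize_green_hours_py green_hours → Spec_normalize_green_hours_py green_hours (normalize_green_hours_py green_hours)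

-- ===== LEMMAS AND PROOFS =====

theorem mem_pvALoop (l : List Int) (acc : List Int) (x : Int) :
    x ∈ pvALoop acc l ↔ x ∈ acc ∨ (x ∈ l ∧ 0 ≤ x ∧ x ≤ 23) := by
  induction l generalizing acc with
  | nil => simp [pvALoop]
  | cons item rest ih =>
    simp only [pvALoop]
    split_ifs with h
    · rw [ih]
      simp only [List.mem_append, List.mem_cons, List.not_mem_nil, or_false]
      constructor
      · rintro ((hx | rfl) | ⟨hx, hb⟩)
        · exact Or.inl hx
        · exact Or.inr ⟨Or.inl rfl, h.1, h.2.1⟩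
        · exact Or.inr ⟨Or.inr hx, hb⟩
      · rintro (hx | ⟨(rfl | hx), hb⟩)
        · exact Or.inl (Or.inl hx)
        · exact Or.inl (Or.inr rfl)
        · exact Or.inr ⟨hx, hb⟩
    · rw [ih]
      simp only [List.mem_cons]
      constructor
      · rintro (hx | ⟨hx, hb⟩)
        · exact Or.inl hx
        · exact Or.inr ⟨Or.inr hx, hb⟩
      · rintro (hx | ⟨(rfl | hx), hb⟩)
        · exact Or.inl hx
        · exact Or.inl (by by_contra hmem; exact h ⟨hb.1, hb.2, hmem⟩)
        · exact Or.inr ⟨hx, hb⟩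

theorem nodup_pvALoop (l : List Int) (acc : List Int) (hacc : acc.Nodup) :
    (pvALoop acc l).Nodup := by
  induction l generalizing acc with
  | nil => simpa [pvALoop]
  | cons item rest ih =>
    simp only [pvALoop]
    split_ifs with h
    · exact ih _ (by
        simp [List.nodup_append, hacc]
        exact fun a ha heq => h.2.2 (heq ▸ ha))
    · exact ih _ hacc

theorem mem_alt (gh : Option (List Int)) (x : Int) :
    x ∈ normalize_green_hours_py_alt gh ↔ x ∈ gh.getD [] ∧ 0 ≤ x ∧ x ≤ 23 := by
  unfold normalize_green_hours_py_alt
  simp only [List.mem_filter, PySem.List.mem_pyRange_one]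
  rw [show (gh.getD []).foldl PySem.Set.add PySem.Set.empty = PySem.Set.ofList (gh.getD []) from
      (PySem.Set.ofList_eq_foldl _).symm]
  simp only [PySem.Set.contains, List.contains_iff_mem, PySem.Set.mem_ofList]
  exact ⟨fun ⟨⟨a, b⟩, c⟩ => ⟨c, a, by omega⟩, fun ⟨c, a, b⟩ => ⟨⟨a, by omega⟩, c⟩⟩

theorem alt_pairwise (gh : Option (List Int)) :
    (normalize_green_hours_py_alt gh).Pairwise (· ≤ ·) := by
  unfold normalize_green_hours_py_alt
  exact ((PySem.List.pairwise_lt_pyRange_one 0 24).filter _).imp (fun h => le_of_lt h)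

theorem alt_nodup (gh : Option (List Int)) : (normalize_green_hours_py_alt gh).Nodup := by
  unfold normalize_green_hours_py_alt
  exact (PySem.List.nodup_pyRange_one 0 24).filter _

-- ===== VERDICT (by name: the statement is the Claim_ definition above) =====
theorem normalize_green_hours_py_spec : Claim_equal_normalize_green_hours_py := by
  intro gh _
  unfold Spec_normalize_green_hours_py normalize_green_hours_py
  have hperm : (normalize_green_hours_py_alt gh).Perm (pvALoop [] (gh.getD [])) := by
    rw [List.perm_ext_iff_of_nodup (alt_nodup gh) (nodup_pvALoop _ _ List.nodup_nil)]
    intro x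
    rw [mem_alt, mem_pvALoop]
    simp
  exact PySem.List.sorted_id_eq_of_perm_of_pairwise _ _ hperm (alt_pairwise gh)
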